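-- pv_equiv track=rewrite | github.com/cjrzs/MyLeetCode | Acwing/动态规划/1027. 方格取数.py | fangge
-- ===== SOURCE A (Python) =====
-- from typing import List
--
-- def fangge(array: List[List[int]]):
--     res = 0
--     n = len(array)
--
--     dp = [[[0] * (n + 1) for _ in range(n + 1)] for _ in range(n * 2 + 2)]
--     for k in range(2, len(dp)):
--         for i1 in range(1, len(dp[0])):
--             for i2 in range(1, len(dp[0][0])):
--                 j1 = k - i1
--                 j2 = k - i2
--                 if 1 <= j1 <= n and 1 <= j2 <= n:
--                     tmp = array[i1 - 1][j1 - 1]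
--                     if j1 != j2:
--                         tmp += array[i2 - 1][j2 - 1]
--                     dp[k][i1][i2] = max(dp[k-1][i1-1][i2-1], dp[k - 1][i1 - 1][i2],
--                                         dp[k - 1][i1][i2 - 1], dp[k - 1][i1][i2]) + tmp
--                     res = max(res, dp[k][i1][i2])
--     return res
-- ===== SOURCE B (Python) =====
-- def fangge(array):
--     n = len(array)
--
--     def ok(k, p1, p2):
--         return (2 <= k and 1 <= p1 <= n and 1 <= p2 <= n
--                 and 1 <= k - p1 <= n and 1 <= k - p2 <= n)
--
--     memo = {}
--
--     def best(k, i1, i2):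
--         # max value of two paths whose heads sit on cells (i1, k-i1) and (i2, k-i2)
--         key = (k, i1, i2)
--         v = memo.get(key)
--         if v is None:
--             tmp = array[i1 - 1][k - i1 - 1]
--             if i1 != i2:
--                 tmp += array[i2 - 1][k - i2 - 1]
--             v1 = best(k - 1, i1 - 1, i2 - 1) if ok(k - 1, i1 - 1, i2 - 1) else 0
--             v2 = best(k - 1, i1 - 1, i2) if ok(k - 1, i1 - 1, i2) else 0
--             v3 = best(k - 1, i1, i2 - 1) if ok(k - 1, i1, i2 - 1) else 0
--             v4 = best(k - 1, i1, i2) if ok(k - 1, i1, i2) else 0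
--             v = tmp + max(v1, v2, v3, v4)
--             memo[key] = v
--         return v
--     res = 0
--     for k in range(2, 2 * n + 2):
--         for i1 in range(1, n + 1):
--             for i2 in range(1, n + 1):
--                 if ok(k, i1, i2):
--                     res = max(res, best(k, i1, i2))
--     return res
-- ===== Notes on version B (the rewrite author's own statement) =====
-- stated objective: alternative
-- what changed: Replaces A's bottom-up (2n+2)x(n+1)x(n+1) table filled layer by layer with top-down memoized recursion over states (k,i1,i2) stored in a dict, keeping the same running maximum over all valid partial states.
import Mathlib
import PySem

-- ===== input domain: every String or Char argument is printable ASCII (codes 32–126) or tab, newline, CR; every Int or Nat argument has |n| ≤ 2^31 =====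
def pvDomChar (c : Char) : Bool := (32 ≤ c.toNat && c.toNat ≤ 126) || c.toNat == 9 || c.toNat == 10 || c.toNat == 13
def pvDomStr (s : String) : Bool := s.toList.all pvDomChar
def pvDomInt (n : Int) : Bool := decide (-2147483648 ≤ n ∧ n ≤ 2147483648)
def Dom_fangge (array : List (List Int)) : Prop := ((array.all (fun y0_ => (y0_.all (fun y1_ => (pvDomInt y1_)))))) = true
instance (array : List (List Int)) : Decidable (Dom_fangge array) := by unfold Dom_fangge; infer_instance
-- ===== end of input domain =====

-- B replaces A's bottom-up 3D table with top-down memoized recursion over the same states (k,i1,i2);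
-- same values, same running maximum over all valid partial states (objective: alternative, not faster).

-- ===== PORT A =====
-- dp[k][i1][i2] read with defaults (indices are nonnegative and in range wherever A reads/writes)
def get3 (dp : List (List (List Int))) (k i1 i2 : Int) : Int :=
  PySem.List.pyGetD (PySem.List.pyGetD (PySem.List.pyGetD dp k []) i1 []) i2 0

-- dp[k][i1][i2] = v  (indices nonnegative and in range at every write A performs)
def set3 (dp : List (List (List Int))) (k i1 i2 : Int) (v : Int) : List (List (List Int)) :=
  PySem.List.pySetD dp k
    (PySem.List.pySetD (PySem.List.pyGetD dp k []) i1
      (PySem.List.pySetD (PySem.List.pyGetD (PySem.List.pyGetD dp k []) i1 []) i2 v))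

-- body of A's innermost (i2) loop
def stepA2 (array : List (List Int)) (n k i1 : Int)
    (st : Int × List (List (List Int))) (i2 : Int) : Int × List (List (List Int)) :=
  let j1 := k - i1
  let j2 := k - i2
  if 1 ≤ j1 ∧ j1 ≤ n ∧ 1 ≤ j2 ∧ j2 ≤ n then
    let tmp := PySem.List.pyGetD (PySem.List.pyGetD array (i1 - 1) []) (j1 - 1) 0
    let tmp := if j1 ≠ j2 then tmp + PySem.List.pyGetD (PySem.List.pyGetD array (i2 - 1) []) (j2 - 1) 0 else tmp
    let v := max (max (max (get3 st.2 (k-1) (i1-1) (i2-1)) (get3 st.2 (k-1) (i1-1) i2))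
                      (get3 st.2 (k-1) i1 (i2-1))) (get3 st.2 (k-1) i1 i2) + tmp
    let dp' := set3 st.2 k i1 i2 v
    (max st.1 (get3 dp' k i1 i2), dp')
  else st

-- A's i1 loop
def stepA1 (array : List (List Int)) (n k : Int)
    (st : Int × List (List (List Int))) (i1 : Int) : Int × List (List (List Int)) :=
  (PySem.List.pyRange 1 (n + 1) 1).foldl (stepA2 array n k i1) st

-- A's k loop
def stepA0 (array : List (List Int)) (n : Int)
    (st : Int × List (List (List Int))) (k : Int) : Int × List (List (List Int)) :=
  (PySem.List.pyRange 1 (n + 1) 1).foldl (stepA1 array n k) st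

def fangge (array : List (List Int)) : Int :=
  let n : Int := array.length
  let dp : List (List (List Int)) :=
    List.replicate (array.length * 2 + 2)
      (List.replicate (array.length + 1) (List.replicate (array.length + 1) (0 : Int)))
  ((PySem.List.pyRange 2 (n * 2 + 2) 1).foldl (stepA0 array n) ((0 : Int), dp)).1

-- ===== PORT B =====
-- B's ok(k, p1, p2): the state is a pair of in-grid cells (p1, k-p1), (p2, k-p2) with k ≥ 2
def okB (n k p1 p2 : Int) : Bool :=
  decide (2 ≤ k ∧ 1 ≤ p1 ∧ p1 ≤ n ∧ 1 ≤ p2 ∧ p2 ≤ n ∧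
          1 ≤ k - p1 ∧ k - p1 ≤ n ∧ 1 ≤ k - p2 ∧ k - p2 ≤ n)

-- B's memoized best(k, i1, i2); the memo dict is threaded explicitly.
-- The recursion descends on k; the Nat fuel (kept equal to k.toNat, a totality guard only —
-- every recursive call is guarded by okB, which forces 2 ≤ k-1) makes it structural.
def bestBF (array : List (List Int)) (n : Int) :
    Nat → Int → Int → Int → PySem.Dict (Int × Int × Int) Int →
      Int × PySem.Dict (Int × Int × Int) Int
  | 0, _, _, _, memo => (0, memo)  -- never reached: fuel = k.toNat and every call has 2 ≤ k
  | fuel + 1, k, i1, i2, memo =>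
    match memo.get? (k, i1, i2) with
    | some v => (v, memo)
    | none =>
      let tmp := PySem.List.pyGetD (PySem.List.pyGetD array (i1 - 1) []) (k - i1 - 1) 0
      let tmp := if i1 ≠ i2 then tmp + PySem.List.pyGetD (PySem.List.pyGetD array (i2 - 1) []) (k - i2 - 1) 0 else tmp
      let p1 := if okB n (k-1) (i1-1) (i2-1) then bestBF array n fuel (k-1) (i1-1) (i2-1) memo else (0, memo)
      let p2 := if okB n (k-1) (i1-1) i2 then bestBF array n fuel (k-1) (i1-1) i2 p1.2 else (0, p1.2)
      let p3 := if okB n (k-1) i1 (i2-1) then bestBF array n fuel (k-1) i1 (i2-1) p2.2 else (0, p2.2)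
      let p4 := if okB n (k-1) i1 i2 then bestBF array n fuel (k-1) i1 i2 p3.2 else (0, p3.2)
      let v := tmp + max (max (max p1.1 p2.1) p3.1) p4.1
      (v, p4.2.insert (k, i1, i2) v)

def bestB (array : List (List Int)) (n k i1 i2 : Int)
    (memo : PySem.Dict (Int × Int × Int) Int) : Int × PySem.Dict (Int × Int × Int) Int :=
  bestBF array n k.toNat k i1 i2 memo

-- body of B's innermost (i2) loop
def stepB2 (array : List (List Int)) (n k i1 : Int)
    (st : Int × PySem.Dict (Int × Int × Int) Int) (i2 : Int) :
    Int × PySem.Dict (Int × Int × Int) Int :=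
  if okB n k i1 i2 then
    let p := bestB array n k i1 i2 st.2
    (max st.1 p.1, p.2)
  else st

def stepB1 (array : List (List Int)) (n k : Int)
    (st : Int × PySem.Dict (Int × Int × Int) Int) (i1 : Int) :
    Int × PySem.Dict (Int × Int × Int) Int :=
  (PySem.List.pyRange 1 (n + 1) 1).foldl (stepB2 array n k i1) st

def stepB0 (array : List (List Int)) (n : Int)
    (st : Int × PySem.Dict (Int × Int × Int) Int) (k : Int) :
    Int × PySem.Dict (Int × Int × Int) Int :=
  (PySem.List.pyRange 1 (n + 1) 1).foldl (stepB1 array n k) st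

def fangge_alt (array : List (List Int)) : Int :=
  let n : Int := array.length
  ((PySem.List.pyRange 2 (2 * n + 2) 1).foldl (stepB0 array n)
    ((0 : Int), (PySem.Dict.empty : PySem.Dict (Int × Int × Int) Int))).1

-- ===== PRECONDITION & SPEC =====
-- Pre_ excludes exactly the inputs where Python A raises IndexError: a row shorter than the
-- number of rows (A indexes array[i][j] for all i, j < len(array)).
def Pre_fangge (array : List (List Int)) : Prop :=
  ∀ row ∈ array, array.length ≤ row.length
instance (array : List (List Int)) : Decidable (Pre_fangge array) := by unfold Pre_fangge; infer_instance

def pvWitness_fangge : List (List Int) := [[1, 2], [3, 4]]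

def Spec_fangge (array : List (List Int)) (out : Int) : Prop := out = fangge_alt array
instance (array : List (List Int)) (out : Int) : Decidable (Spec_fangge array out) := by unfold Spec_fangge; infer_instance

-- ===== CLAIM (what is proved, stated in full; the proofs are below) =====
def Claim_equal_fangge : Prop := ∀ (array : List (List Int)), Dom_fangge array → Pre_fangge array → Spec_fangge array (fangge array)

-- ===== LEMMAS AND PROOFS =====

-- pure value of state (k,i1,i2): the common mathematical recurrence both programs compute
-- (same fuel device as bestBF: fuel = k.toNat, recursion guarded by okB)
def FvF (array : List (List Int)) (n : Int) : Nat → Int → Int → Int → Int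
  | 0, _, _, _ => 0
  | fuel + 1, k, i1, i2 =>
    let tmp := PySem.List.pyGetD (PySem.List.pyGetD array (i1 - 1) []) (k - i1 - 1) 0
    let tmp := if i1 ≠ i2 then tmp + PySem.List.pyGetD (PySem.List.pyGetD array (i2 - 1) []) (k - i2 - 1) 0 else tmp
    let v1 := if okB n (k-1) (i1-1) (i2-1) then FvF array n fuel (k-1) (i1-1) (i2-1) else 0
    let v2 := if okB n (k-1) (i1-1) i2 then FvF array n fuel (k-1) (i1-1) i2 else 0
    let v3 := if okB n (k-1) i1 (i2-1) then FvF array n fuel (k-1) i1 (i2-1) else 0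
    let v4 := if okB n (k-1) i1 i2 then FvF array n fuel (k-1) i1 i2 else 0
    tmp + max (max (max v1 v2) v3) v4

def Fv (array : List (List Int)) (n k i1 i2 : Int) : Int :=
  FvF array n k.toNat k i1 i2

-- guarded value: 0 on invalid states (exactly what an unwritten dp cell holds)
def G (array : List (List Int)) (n k i1 i2 : Int) : Int :=
  if okB n k i1 i2 then Fv array n k i1 i2 else 0

def MemoOK (array : List (List Int)) (n : Int) (m : PySem.Dict (Int × Int × Int) Int) : Prop :=
  ∀ k i1 i2 v, m.get? (k, i1, i2) = some v → v = Fv array n k i1 i2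

lemma pyGetD_toNat {α : Type} (xs : List α) (i : Int) (d : α) (h : 0 ≤ i) :
    PySem.List.pyGetD xs i d = xs.getD i.toNat d := by
  have h2 := PySem.List.pyGetD_natCast xs i.toNat d
  rwa [Int.toNat_of_nonneg h] at h2

-- pure running-max folds (the common shape both main loops reduce to)
def pure2 (array : List (List Int)) (n k i1 : Int) (r : Int) : Int :=
  (PySem.List.pyRange 1 (n + 1) 1).foldl
    (fun r i2 => if okB n k i1 i2 then max r (Fv array n k i1 i2) else r) r

def pure1 (array : List (List Int)) (n k : Int) (r : Int) : Int :=
  (PySem.List.pyRange 1 (n + 1) 1).foldl (fun r i1 => pure2 array n k i1 r) r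

def pure0 (array : List (List Int)) (n : Int) : Int :=
  (PySem.List.pyRange 2 (2 * n + 2) 1).foldl (fun r k => pure1 array n k r) 0

lemma G_zero (array : List (List Int)) (n k i1 i2 : Int)
    (h : ¬ (2 ≤ k ∧ 1 ≤ i1 ∧ i1 ≤ n ∧ 1 ≤ i2 ∧ i2 ≤ n ∧
            1 ≤ k - i1 ∧ k - i1 ≤ n ∧ 1 ≤ k - i2 ∧ k - i2 ≤ n)) :
    G array n k i1 i2 = 0 := by
  rw [G, if_neg (by simpa only [okB, decide_eq_true_eq] using h)]

lemma FvF_conv (array : List (List Int)) (n k : Int) (f : Nat) (hf : f = (k-1).toNat)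
    (i1' i2' : Int) :
    (if okB n (k-1) i1' i2' then FvF array n f (k-1) i1' i2' else 0) =
      G array n (k-1) i1' i2' := by
  by_cases h : okB n (k-1) i1' i2' = true
  · rw [if_pos h, G, if_pos h, Fv, ← hf]
  · rw [if_neg h, G, if_neg h]

lemma Fv_eq_G (array : List (List Int)) (n k i1 i2 : Int) (h1 : 1 ≤ k) :
    Fv array n k i1 i2 =
      (let tmp := PySem.List.pyGetD (PySem.List.pyGetD array (i1 - 1) []) (k - i1 - 1) 0
       if i1 ≠ i2 then tmp + PySem.List.pyGetD (PySem.List.pyGetD array (i2 - 1) []) (k - i2 - 1) 0 else tmp)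
      + max (max (max (G array n (k-1) (i1-1) (i2-1)) (G array n (k-1) (i1-1) i2))
                 (G array n (k-1) i1 (i2-1))) (G array n (k-1) i1 i2) := by
  rw [Fv, show k.toNat = ((k-1).toNat) + 1 by omega]
  simp only [FvF]
  rw [FvF_conv array n k _ rfl, FvF_conv array n k _ rfl,
      FvF_conv array n k _ rfl, FvF_conv array n k _ rfl]

lemma bestBF_spec (array : List (List Int)) (n : Int) :
    ∀ (fuel : Nat) (k i1 i2 : Int), fuel = k.toNat →
      ∀ m, MemoOK array n m →
        (bestBF array n fuel k i1 i2 m).1 = Fv array n k i1 i2 ∧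
        MemoOK array n (bestBF array n fuel k i1 i2 m).2 := by
  intro fuel
  induction fuel with
  | zero =>
    intro k i1 i2 hf m hm
    refine ⟨?_, hm⟩
    rw [Fv, ← hf]
    rfl
  | succ f ih =>
    intro k i1 i2 hf m hm
    simp only [bestBF]
    cases hg : PySem.Dict.get? m (k, i1, i2) with
    | some v =>
      exact ⟨(hm _ _ _ _ hg).symm ▸ rfl, hm⟩
    | none =>
      have step : ∀ (i1' i2' : Int) (m' : PySem.Dict (Int × Int × Int) Int),
          MemoOK array n m' →
          ((if okB n (k-1) i1' i2' then bestBF array n f (k-1) i1' i2' m' else ((0:Int), m')).1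
             = (if okB n (k-1) i1' i2' then Fv array n (k-1) i1' i2' else 0)) ∧
          MemoOK array n ((if okB n (k-1) i1' i2' then bestBF array n f (k-1) i1' i2' m' else ((0:Int), m')).2) := by
        intro i1' i2' m' hm'
        by_cases h : okB n (k-1) i1' i2' = true
        · rw [if_pos h, if_pos h]
          exact ih (k-1) i1' i2' (by simp only [okB, decide_eq_true_eq] at h; omega) m' hm'
        · rw [if_neg h, if_neg h]
          exact ⟨rfl, hm'⟩
      set q1 := (if okB n (k - 1) (i1 - 1) (i2 - 1) then
          bestBF array n f (k - 1) (i1 - 1) (i2 - 1) m else ((0:Int), m)) with hq1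
      obtain ⟨e1, hm1⟩ := step (i1-1) (i2-1) m hm
      rw [← hq1] at e1 hm1
      set q2 := (if okB n (k - 1) (i1 - 1) i2 then
          bestBF array n f (k - 1) (i1 - 1) i2 q1.2 else ((0:Int), q1.2)) with hq2
      obtain ⟨e2, hm2⟩ := step (i1-1) i2 q1.2 hm1
      rw [← hq2] at e2 hm2
      set q3 := (if okB n (k - 1) i1 (i2 - 1) then
          bestBF array n f (k - 1) i1 (i2 - 1) q2.2 else ((0:Int), q2.2)) with hq3
      obtain ⟨e3, hm3⟩ := step i1 (i2-1) q2.2 hm2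
      rw [← hq3] at e3 hm3
      set q4 := (if okB n (k - 1) i1 i2 then
          bestBF array n f (k - 1) i1 i2 q3.2 else ((0:Int), q3.2)) with hq4
      obtain ⟨e4, hm4⟩ := step i1 i2 q3.2 hm3
      rw [← hq4] at e4 hm4
      have hv : ((if i1 ≠ i2 then
            PySem.List.pyGetD (PySem.List.pyGetD array (i1 - 1) []) (k - i1 - 1) 0 +
              PySem.List.pyGetD (PySem.List.pyGetD array (i2 - 1) []) (k - i2 - 1) 0
          else PySem.List.pyGetD (PySem.List.pyGetD array (i1 - 1) []) (k - i1 - 1) 0) +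
          max (max (max q1.1 q2.1) q3.1) q4.1) = Fv array n k i1 i2 := by
        have hk1 : 1 ≤ k := by omega
        have hGfold : ∀ i1' i2' : Int,
            (if okB n (k-1) i1' i2' then Fv array n (k-1) i1' i2' else 0) =
              G array n (k-1) i1' i2' := fun _ _ => rfl
        rw [e1, e2, e3, e4, hGfold, hGfold, hGfold, hGfold,
            Fv_eq_G array n k i1 i2 hk1]
      refine ⟨hv, ?_⟩
      intro a b c w hw
      rw [PySem.Dict.get?_insert] at hw
      by_cases hab : (a, b, c) = ((k, i1, i2) : Int × Int × Int)
      · rw [if_pos hab] at hw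
        injection hab with ha hbc
        injection hbc with hb hc
        subst ha; subst hb; subst hc
        exact ((Option.some.inj hw).symm).trans hv
      · rw [if_neg hab] at hw
        exact hm4 a b c w hw

lemma bestB_spec (array : List (List Int)) (n k i1 i2 : Int)
    (m : PySem.Dict (Int × Int × Int) Int) (hm : MemoOK array n m) :
    (bestB array n k i1 i2 m).1 = Fv array n k i1 i2 ∧
    MemoOK array n (bestB array n k i1 i2 m).2 :=
  bestBF_spec array n k.toNat k i1 i2 rfl m hm

lemma loopB2 (array : List (List Int)) (n k i1 : Int) :
    ∀ (L : List Int) (st : Int × PySem.Dict (Int × Int × Int) Int), MemoOK array n st.2 →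
      (L.foldl (stepB2 array n k i1) st).1 =
        L.foldl (fun r i2 => if okB n k i1 i2 then max r (Fv array n k i1 i2) else r) st.1 ∧
      MemoOK array n (L.foldl (stepB2 array n k i1) st).2 := by
  intro L
  induction L with
  | nil => intro st hm; exact ⟨rfl, hm⟩
  | cons x L ihL =>
    intro st hm
    simp only [List.foldl_cons]
    by_cases h : okB n k i1 x = true
    · obtain ⟨e, hm'⟩ := bestB_spec array n k i1 x st.2 hm
      have hstep : stepB2 array n k i1 st x =
          (max st.1 (Fv array n k i1 x), (bestB array n k i1 x st.2).2) := by
        simp only [stepB2, if_pos h, e]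
      rw [hstep, if_pos h]
      exact ihL _ hm'
    · have hstep : stepB2 array n k i1 st x = st := by
        simp only [stepB2, if_neg h]
      rw [hstep, if_neg h]
      exact ihL _ hm

lemma loopB1 (array : List (List Int)) (n k : Int) :
    ∀ (L : List Int) (st : Int × PySem.Dict (Int × Int × Int) Int), MemoOK array n st.2 →
      (L.foldl (stepB1 array n k) st).1 =
        L.foldl (fun r i1 => pure2 array n k i1 r) st.1 ∧
      MemoOK array n (L.foldl (stepB1 array n k) st).2 := by
  intro L
  induction L with
  | nil => intro st hm; exact ⟨rfl, hm⟩
  | cons x L ihL =>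
    intro st hm
    simp only [List.foldl_cons]
    obtain ⟨e, hm'⟩ := loopB2 array n k x (PySem.List.pyRange 1 (n+1) 1) st hm
    obtain ⟨e2, hm2⟩ := ihL (stepB1 array n k st x) (by simpa only [stepB1] using hm')
    refine ⟨?_, hm2⟩
    have e1' : (stepB1 array n k st x).1 = pure2 array n k x st.1 := by
      simpa only [stepB1, pure2] using e
    rw [e2, e1']

lemma loopB0 (array : List (List Int)) (n : Int) :
    ∀ (L : List Int) (st : Int × PySem.Dict (Int × Int × Int) Int), MemoOK array n st.2 →
      (L.foldl (stepB0 array n) st).1 =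
        L.foldl (fun r k => pure1 array n k r) st.1 ∧
      MemoOK array n (L.foldl (stepB0 array n) st).2 := by
  intro L
  induction L with
  | nil => intro st hm; exact ⟨rfl, hm⟩
  | cons x L ihL =>
    intro st hm
    simp only [List.foldl_cons]
    obtain ⟨e, hm'⟩ := loopB1 array n x (PySem.List.pyRange 1 (n+1) 1) st hm
    obtain ⟨e2, hm2⟩ := ihL (stepB0 array n st x) (by simpa only [stepB0] using hm')
    refine ⟨?_, hm2⟩
    have e1' : (stepB0 array n st x).1 = pure1 array n x st.1 := by
      simpa only [stepB0, pure1] using e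
    rw [e2, e1']

lemma fangge_alt_eq_pure (array : List (List Int)) :
    fangge_alt array = pure0 array (array.length : Int) := by
  have hempty : MemoOK array (array.length : Int) (PySem.Dict.empty : PySem.Dict (Int × Int × Int) Int) := by
    intro a b c w hw
    rw [PySem.Dict.get?_empty] at hw
    exact absurd hw (by simp)
  unfold fangge_alt pure0
  exact (loopB0 array _ _ ((0 : Int), PySem.Dict.empty) hempty).1

-- ===== A side =====

def Shape (dp : List (List (List Int))) (n : Int) : Prop :=
  dp.length = 2 * n.toNat + 2 ∧ ∀ L ∈ dp, L.length = n.toNat + 1 ∧ ∀ R ∈ L, R.length = n.toNat + 1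

-- lexicographic "already processed" order on states
abbrev lexLt (k p q K I1 I2 : Int) : Prop :=
  k < K ∨ (k = K ∧ (p < I1 ∨ (p = I1 ∧ q < I2)))

def InvA (array : List (List Int)) (n : Int) (dp : List (List (List Int))) (K I1 I2 : Int) : Prop :=
  Shape dp n ∧
  ∀ k p q : Int, 0 ≤ k → 0 ≤ p → 0 ≤ q →
    get3 dp k p q = if lexLt k p q K I1 I2 then G array n k p q else 0

lemma get3_nonneg (dp : List (List (List Int))) (k i1 i2 : Int)
    (hk : 0 ≤ k) (h1 : 0 ≤ i1) (h2 : 0 ≤ i2) :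
    get3 dp k i1 i2 = ((dp.getD k.toNat []).getD i1.toNat []).getD i2.toNat 0 := by
  unfold get3
  rw [pyGetD_toNat dp k [] hk, pyGetD_toNat (dp.getD k.toNat []) i1 [] h1,
      pyGetD_toNat ((dp.getD k.toNat []).getD i1.toNat []) i2 0 h2]

lemma set3_eq (dp : List (List (List Int))) (n k i1 i2 : Int) (v : Int)
    (hs : Shape dp n)
    (hk : 0 ≤ k) (hk2 : k < 2 * n + 2) (h1 : 0 ≤ i1) (h1n : i1 ≤ n) (h2 : 0 ≤ i2) :
    set3 dp k i1 i2 v =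
      dp.set k.toNat ((dp.getD k.toNat []).set i1.toNat
        (((dp.getD k.toNat []).getD i1.toNat []).set i2.toNat v)) := by
  unfold set3
  rw [pyGetD_toNat dp k [] hk, pyGetD_toNat (dp.getD k.toNat []) i1 [] h1,
      PySem.List.pySetD_of_nonneg _ _ h2, PySem.List.pySetD_of_nonneg _ _ h1,
      PySem.List.pySetD_of_nonneg _ _ hk]

lemma shape_facts (dp : List (List (List Int))) (n k i1 : Int)
    (hs : Shape dp n)
    (hk : 0 ≤ k) (hk2 : k < 2 * n + 2) (h1 : 0 ≤ i1) (h1n : i1 ≤ n) :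
    k.toNat < dp.length ∧ dp.getD k.toNat [] ∈ dp ∧
    (dp.getD k.toNat []).length = n.toNat + 1 ∧
    i1.toNat < (dp.getD k.toNat []).length ∧
    (dp.getD k.toNat []).getD i1.toNat [] ∈ dp.getD k.toNat [] ∧
    ((dp.getD k.toNat []).getD i1.toNat []).length = n.toNat + 1 := by
  obtain ⟨hlen, hrows⟩ := hs
  have hn : 0 ≤ n := by omega
  have hkn : k.toNat < dp.length := by omega
  have hrowmem : dp.getD k.toNat [] ∈ dp := by
    rw [List.getD_eq_getElem dp [] hkn]; exact List.getElem_mem hkn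
  have hrowlen : (dp.getD k.toNat []).length = n.toNat + 1 := (hrows _ hrowmem).1
  have hi1n : i1.toNat < (dp.getD k.toNat []).length := by omega
  have hinnermem : (dp.getD k.toNat []).getD i1.toNat [] ∈ dp.getD k.toNat [] := by
    rw [List.getD_eq_getElem _ [] hi1n]; exact List.getElem_mem hi1n
  exact ⟨hkn, hrowmem, hrowlen, hi1n, hinnermem, (hrows _ hrowmem).2 _ hinnermem⟩

lemma shape_set3 (dp : List (List (List Int))) (n k i1 i2 : Int) (v : Int)
    (hs : Shape dp n)
    (hk : 0 ≤ k) (hk2 : k < 2 * n + 2) (h1 : 0 ≤ i1) (h1n : i1 ≤ n) (h2 : 0 ≤ i2) :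
    Shape (set3 dp k i1 i2 v) n := by
  obtain ⟨hkn, hrowmem, hrowlen, hi1n, hinnermem, hinnerlen⟩ :=
    shape_facts dp n k i1 hs hk hk2 h1 h1n
  obtain ⟨hlen, hrows⟩ := hs
  rw [set3_eq dp n k i1 i2 v ⟨hlen, hrows⟩ hk hk2 h1 h1n h2]
  refine ⟨by simpa using hlen, ?_⟩
  intro L hL
  rcases List.mem_or_eq_of_mem_set hL with h | h
  · exact hrows L h
  · subst h
    refine ⟨by simpa using hrowlen, ?_⟩
    intro R hR
    rcases List.mem_or_eq_of_mem_set hR with h' | h'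
    · exact (hrows _ hrowmem).2 R h'
    · subst h'
      simpa using hinnerlen

lemma get3_set3 (dp : List (List (List Int))) (n k i1 i2 : Int) (v : Int)
    (hs : Shape dp n)
    (hk : 0 ≤ k) (hk2 : k < 2 * n + 2) (h1 : 0 ≤ i1) (h1n : i1 ≤ n) (h2 : 0 ≤ i2) (h2n : i2 ≤ n)
    (k' p q : Int) (hk' : 0 ≤ k') (hp : 0 ≤ p) (hq : 0 ≤ q) :
    get3 (set3 dp k i1 i2 v) k' p q =
      if k' = k ∧ p = i1 ∧ q = i2 then v else get3 dp k' p q := by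
  obtain ⟨hkn, hrowmem, hrowlen, hi1n, hinnermem, hinnerlen⟩ :=
    shape_facts dp n k i1 hs hk hk2 h1 h1n
  have hi2n : i2.toNat < ((dp.getD k.toNat []).getD i1.toNat []).length := by omega
  rw [set3_eq dp n k i1 i2 v hs hk hk2 h1 h1n h2,
      get3_nonneg _ _ _ _ hk' hp hq]
  by_cases hA : k'.toNat = k.toNat
  · have l1 : (dp.set k.toNat ((dp.getD k.toNat []).set i1.toNat
        (((dp.getD k.toNat []).getD i1.toNat []).set i2.toNat v))).getD k'.toNat [] =
        (dp.getD k.toNat []).set i1.toNat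
          (((dp.getD k.toNat []).getD i1.toNat []).set i2.toNat v) := by
      rw [List.getD_eq_getElem?_getD, hA, List.getElem?_set_self hkn, Option.getD_some]
    rw [l1]
    by_cases hB : p.toNat = i1.toNat
    · have l2 : ((dp.getD k.toNat []).set i1.toNat
          (((dp.getD k.toNat []).getD i1.toNat []).set i2.toNat v)).getD p.toNat [] =
          ((dp.getD k.toNat []).getD i1.toNat []).set i2.toNat v := by
        rw [List.getD_eq_getElem?_getD, hB, List.getElem?_set_self hi1n, Option.getD_some]
      rw [l2]
      by_cases hC : q.toNat = i2.toNat
      · have l3 : (((dp.getD k.toNat []).getD i1.toNat []).set i2.toNat v).getD q.toNat 0 = v := by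
          rw [List.getD_eq_getElem?_getD, hC, List.getElem?_set_self hi2n, Option.getD_some]
        rw [l3, if_pos ⟨by omega, by omega, by omega⟩]
      · have l3 : (((dp.getD k.toNat []).getD i1.toNat []).set i2.toNat v).getD q.toNat 0 =
            ((dp.getD k.toNat []).getD i1.toNat []).getD q.toNat 0 := by
          rw [List.getD_eq_getElem?_getD, List.getElem?_set_ne (by omega),
              ← List.getD_eq_getElem?_getD]
        rw [l3, if_neg (by rintro ⟨-, -, rfl⟩; omega),
            get3_nonneg dp k' p q hk' hp hq, hA, hB]
    · have l2 : ((dp.getD k.toNat []).set i1.toNat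
          (((dp.getD k.toNat []).getD i1.toNat []).set i2.toNat v)).getD p.toNat [] =
          (dp.getD k.toNat []).getD p.toNat [] := by
        rw [List.getD_eq_getElem?_getD, List.getElem?_set_ne (by omega),
            ← List.getD_eq_getElem?_getD]
      rw [l2, if_neg (by rintro ⟨-, rfl, -⟩; omega),
          get3_nonneg dp k' p q hk' hp hq, hA]
  · have l1 : (dp.set k.toNat ((dp.getD k.toNat []).set i1.toNat
        (((dp.getD k.toNat []).getD i1.toNat []).set i2.toNat v))).getD k'.toNat [] =
        dp.getD k'.toNat [] := by
      rw [List.getD_eq_getElem?_getD, List.getElem?_set_ne (by omega),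
          ← List.getD_eq_getElem?_getD]
    rw [l1, if_neg (by rintro ⟨rfl, -, -⟩; omega),
        get3_nonneg dp k' p q hk' hp hq]

-- pointer advance: writing state (K,I1,c) (valid case)
lemma invA_write (array : List (List Int)) (n K I1 c : Int)
    (hK : 2 ≤ K) (hK2 : K < 2 * n + 2) (hI1 : 1 ≤ I1) (hI1n : I1 ≤ n)
    (hc : 1 ≤ c) (hcn : c ≤ n)
    (hcond : 1 ≤ K - I1 ∧ K - I1 ≤ n ∧ 1 ≤ K - c ∧ K - c ≤ n)
    (dp : List (List (List Int))) (hInv : InvA array n dp K I1 c) :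
    InvA array n (set3 dp K I1 c (Fv array n K I1 c)) K I1 (c + 1) := by
  obtain ⟨hs, hv⟩ := hInv
  refine ⟨shape_set3 dp n K I1 c _ hs (by omega) hK2 (by omega) hI1n (by omega), ?_⟩
  intro k' p q hk' hp hq
  rw [get3_set3 dp n K I1 c _ hs (by omega) hK2 (by omega) hI1n (by omega) hcn
      k' p q hk' hp hq]
  by_cases hkey : k' = K ∧ p = I1 ∧ q = c
  · obtain ⟨rfl, rfl, rfl⟩ := hkey
    rw [if_pos ⟨rfl, rfl, rfl⟩,
        if_pos (show lexLt k' p q k' p (q+1) from Or.inr ⟨rfl, Or.inr ⟨rfl, by omega⟩⟩),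
        G, if_pos (by simp only [okB, decide_eq_true_eq]; omega)]
  · rw [if_neg hkey, hv k' p q hk' hp hq]
    by_cases hL : lexLt k' p q K I1 c
    · rw [if_pos hL, if_pos (by unfold lexLt at hL ⊢; omega)]
    · rw [if_neg hL, if_neg (by unfold lexLt at hL ⊢; omega)]

-- pointer advance: skipping state (K,I1,c) (invalid case, cell stays 0 = G)
lemma invA_skip (array : List (List Int)) (n K I1 c : Int)
    (hK : 2 ≤ K) (hI1 : 1 ≤ I1) (hI1n : I1 ≤ n) (hc : 1 ≤ c) (hcn : c ≤ n)
    (hcond : ¬ (1 ≤ K - I1 ∧ K - I1 ≤ n ∧ 1 ≤ K - c ∧ K - c ≤ n))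
    (dp : List (List (List Int))) (hInv : InvA array n dp K I1 c) :
    InvA array n dp K I1 (c + 1) := by
  obtain ⟨hs, hv⟩ := hInv
  refine ⟨hs, ?_⟩
  intro k' p q hk' hp hq
  rw [hv k' p q hk' hp hq]
  by_cases hL : lexLt k' p q K I1 c
  · rw [if_pos hL, if_pos (by unfold lexLt at hL ⊢; omega)]
  · by_cases hL2 : lexLt k' p q K I1 (c + 1)
    · rw [if_neg hL, if_pos hL2]
      have hkey : k' = K ∧ p = I1 ∧ q = c := by unfold lexLt at hL hL2; omega
      obtain ⟨rfl, rfl, rfl⟩ := hkey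
      exact (G_zero array n k' p q (by omega)).symm
    · rw [if_neg hL, if_neg hL2]

-- pointer advance: end of a row
lemma invA_row (array : List (List Int)) (n K I1 : Int)
    (dp : List (List (List Int))) (hInv : InvA array n dp K I1 (n + 1)) :
    InvA array n dp K (I1 + 1) 1 := by
  obtain ⟨hs, hv⟩ := hInv
  refine ⟨hs, ?_⟩
  intro k' p q hk' hp hq
  rw [hv k' p q hk' hp hq]
  by_cases hL : lexLt k' p q K I1 (n + 1)
  · rw [if_pos hL, if_pos (by unfold lexLt at hL ⊢; omega)]
  · by_cases hL2 : lexLt k' p q K (I1 + 1) 1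
    · rw [if_neg hL, if_pos hL2]
      have : n + 1 ≤ q ∨ q < 1 := by unfold lexLt at hL hL2; omega
      exact (G_zero array n k' p q (by omega)).symm
    · rw [if_neg hL, if_neg hL2]

-- pointer advance: end of a layer
lemma invA_layer (array : List (List Int)) (n K : Int)
    (dp : List (List (List Int))) (hInv : InvA array n dp K (n + 1) 1) :
    InvA array n dp (K + 1) 1 1 := by
  obtain ⟨hs, hv⟩ := hInv
  refine ⟨hs, ?_⟩
  intro k' p q hk' hp hq
  rw [hv k' p q hk' hp hq]
  by_cases hL : lexLt k' p q K (n + 1) 1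
  · rw [if_pos hL, if_pos (by unfold lexLt at hL ⊢; omega)]
  · by_cases hL2 : lexLt k' p q (K + 1) 1 1
    · rw [if_neg hL, if_pos hL2]
      have : n + 1 ≤ p ∨ p < 1 ∨ q < 1 := by unfold lexLt at hL hL2; omega
      exact (G_zero array n k' p q (by omega)).symm
    · rw [if_neg hL, if_neg hL2]

lemma loopA2_spec (array : List (List Int)) (n K I1 : Int)
    (hn : 0 ≤ n) (hK : 2 ≤ K) (hK2 : K < 2 * n + 2) (hI1 : 1 ≤ I1) (hI1n : I1 ≤ n) :
    ∀ (d : Nat) (c : Int), c = n + 1 - d → 1 ≤ c →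
      ∀ (r : Int) dp, InvA array n dp K I1 c →
        InvA array n ((PySem.List.pyRange c (n+1) 1).foldl (stepA2 array n K I1) (r, dp)).2 K I1 (n+1) ∧
        ((PySem.List.pyRange c (n+1) 1).foldl (stepA2 array n K I1) (r, dp)).1 =
          (PySem.List.pyRange c (n+1) 1).foldl
            (fun r i2 => if okB n K I1 i2 then max r (Fv array n K I1 i2) else r) r := by
  intro d
  induction d with
  | zero =>
    intro c hc hc1 r dp hInv
    rw [PySem.List.pyRange_one_eq_nil (by omega)]
    exact ⟨by simpa [show c = n + 1 by omega] using hInv, rfl⟩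
  | succ d ih =>
    intro c hc hc1 r dp hInv
    have hcn : c ≤ n := by omega
    rw [PySem.List.pyRange_one_cons (by omega : c < n + 1)]
    simp only [List.foldl_cons]
    obtain ⟨hs, hv⟩ := hInv
    by_cases hcnd : 1 ≤ K - I1 ∧ K - I1 ≤ n ∧ 1 ≤ K - c ∧ K - c ≤ n
    · obtain ⟨hj1, hj2, hj3, hj4⟩ := hcnd
      have hok : okB n K I1 c = true := by
        simp only [okB, decide_eq_true_eq]; omega
      have hr1 : get3 dp (K-1) (I1-1) (c-1) = G array n (K-1) (I1-1) (c-1) := by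
        rw [hv (K-1) (I1-1) (c-1) (by omega) (by omega) (by omega),
            if_pos (show lexLt (K-1) (I1-1) (c-1) K I1 c from Or.inl (by omega))]
      have hr2 : get3 dp (K-1) (I1-1) c = G array n (K-1) (I1-1) c := by
        rw [hv (K-1) (I1-1) c (by omega) (by omega) (by omega),
            if_pos (show lexLt (K-1) (I1-1) c K I1 c from Or.inl (by omega))]
      have hr3 : get3 dp (K-1) I1 (c-1) = G array n (K-1) I1 (c-1) := by
        rw [hv (K-1) I1 (c-1) (by omega) (by omega) (by omega),
            if_pos (show lexLt (K-1) I1 (c-1) K I1 c from Or.inl (by omega))]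
      have hr4 : get3 dp (K-1) I1 c = G array n (K-1) I1 c := by
        rw [hv (K-1) I1 c (by omega) (by omega) (by omega),
            if_pos (show lexLt (K-1) I1 c K I1 c from Or.inl (by omega))]
      have hstep : stepA2 array n K I1 (r, dp) c =
          (max r (Fv array n K I1 c), set3 dp K I1 c (Fv array n K I1 c)) := by
        simp only [stepA2]
        rw [if_pos (show (1:Int) ≤ K - I1 ∧ K - I1 ≤ n ∧ 1 ≤ K - c ∧ K - c ≤ n from
              ⟨hj1, hj2, hj3, hj4⟩)]
        rw [hr1, hr2, hr3, hr4]
        have hval : max (max (max (G array n (K-1) (I1-1) (c-1)) (G array n (K-1) (I1-1) c))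
              (G array n (K-1) I1 (c-1))) (G array n (K-1) I1 c) +
            (if K - I1 ≠ K - c then
              PySem.List.pyGetD (PySem.List.pyGetD array (I1-1) []) (K - I1 - 1) 0 +
                PySem.List.pyGetD (PySem.List.pyGetD array (c-1) []) (K - c - 1) 0
            else PySem.List.pyGetD (PySem.List.pyGetD array (I1-1) []) (K - I1 - 1) 0) =
            Fv array n K I1 c := by
          conv_rhs => rw [Fv_eq_G array n K I1 c (by omega)]
          simp only [ne_eq, sub_right_inj]
          exact add_comm _ _
        rw [hval,
            get3_set3 dp n K I1 c (Fv array n K I1 c) hs (by omega) hK2 (by omega) hI1n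
              (by omega) hcn K I1 c (by omega) (by omega) (by omega),
            if_pos ⟨rfl, rfl, rfl⟩]
      rw [hstep, if_pos hok]
      exact ih (c+1) (by omega) (by omega) (max r (Fv array n K I1 c)) _
        (invA_write array n K I1 c hK hK2 hI1 hI1n hc1 hcn ⟨hj1, hj2, hj3, hj4⟩ dp ⟨hs, hv⟩)
    · have hok : ¬ okB n K I1 c = true := by
        simp only [okB, decide_eq_true_eq]; omega
      have hstep : stepA2 array n K I1 (r, dp) c = (r, dp) := by
        simp only [stepA2]
        rw [if_neg hcnd]
      rw [hstep, if_neg hok]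
      exact ih (c+1) (by omega) (by omega) r dp
        (invA_skip array n K I1 c hK hI1 hI1n hc1 hcn hcnd dp ⟨hs, hv⟩)

lemma loopA1_spec (array : List (List Int)) (n K : Int)
    (hn : 0 ≤ n) (hK : 2 ≤ K) (hK2 : K < 2 * n + 2) :
    ∀ (d : Nat) (c : Int), c = n + 1 - d → 1 ≤ c →
      ∀ (r : Int) dp, InvA array n dp K c 1 →
        InvA array n ((PySem.List.pyRange c (n+1) 1).foldl (stepA1 array n K) (r, dp)).2 K (n+1) 1 ∧
        ((PySem.List.pyRange c (n+1) 1).foldl (stepA1 array n K) (r, dp)).1 =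
          (PySem.List.pyRange c (n+1) 1).foldl (fun r i1 => pure2 array n K i1 r) r := by
  intro d
  induction d with
  | zero =>
    intro c hc hc1 r dp hInv
    rw [PySem.List.pyRange_one_eq_nil (by omega)]
    exact ⟨by simpa [show c = n + 1 by omega] using hInv, rfl⟩
  | succ d ih =>
    intro c hc hc1 r dp hInv
    have hcn : c ≤ n := by omega
    rw [PySem.List.pyRange_one_cons (by omega : c < n + 1)]
    simp only [List.foldl_cons]
    obtain ⟨hI2, hres⟩ := loopA2_spec array n K c hn hK hK2 hc1 hcn n.toNat 1
      (by omega) (by omega) r dp hInv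
    have e1 : (stepA1 array n K (r, dp) c).1 = pure2 array n K c r := by
      simpa only [stepA1, pure2] using hres
    have hI' : InvA array n (stepA1 array n K (r, dp) c).2 K (c+1) 1 :=
      invA_row array n K c _ (by simpa only [stepA1] using hI2)
    obtain ⟨hA, hB⟩ := ih (c+1) (by omega) (by omega)
      (stepA1 array n K (r, dp) c).1 (stepA1 array n K (r, dp) c).2 hI'
    rw [Prod.mk.eta] at hA hB
    refine ⟨hA, ?_⟩
    rw [hB, e1]

lemma loopA0_spec (array : List (List Int)) (n : Int) (hn : 0 ≤ n) :
    ∀ (d : Nat) (c : Int), c = 2 * n + 2 - d → 2 ≤ c →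
      ∀ (r : Int) dp, InvA array n dp c 1 1 →
        ((PySem.List.pyRange c (2*n+2) 1).foldl (stepA0 array n) (r, dp)).1 =
          (PySem.List.pyRange c (2*n+2) 1).foldl (fun r k => pure1 array n k r) r := by
  intro d
  induction d with
  | zero =>
    intro c hc hc1 r dp hInv
    rw [PySem.List.pyRange_one_eq_nil (by omega)]
    rfl
  | succ d ih =>
    intro c hc hc1 r dp hInv
    have hcn : c < 2 * n + 2 := by omega
    rw [PySem.List.pyRange_one_cons (by omega : c < 2 * n + 2)]
    simp only [List.foldl_cons]
    obtain ⟨hI, hres⟩ := loopA1_spec array n c hn hc1 hcn n.toNat 1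
      (by omega) (by omega) r dp hInv
    have e1 : (stepA0 array n (r, dp) c).1 = pure1 array n c r := by
      simpa only [stepA0, pure1] using hres
    have hI' : InvA array n (stepA0 array n (r, dp) c).2 (c+1) 1 1 :=
      invA_layer array n c _ (by simpa only [stepA0] using hI)
    have hB := ih (c+1) (by omega) (by omega)
      (stepA0 array n (r, dp) c).1 (stepA0 array n (r, dp) c).2 hI'
    rw [Prod.mk.eta] at hB
    rw [hB, e1]

lemma get3_replicate (a b c' : Nat) (k p q : Int)
    (hk : 0 ≤ k) (hp : 0 ≤ p) (hq : 0 ≤ q) :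
    get3 (List.replicate a (List.replicate b (List.replicate c' (0:Int)))) k p q = 0 := by
  have hrep : ∀ {α : Type} (m : Nat) (x d : α) (i : Nat),
      (List.replicate m x).getD i d = if i < m then x else d := by
    intro α m x d i
    rw [List.getD_eq_getElem?_getD, List.getElem?_replicate]
    split_ifs <;> rfl
  rw [get3_nonneg _ _ _ _ hk hp hq, hrep]
  split_ifs with h1
  · rw [hrep]
    split_ifs with h2
    · rw [hrep]
      split_ifs with h3 <;> rfl
    · simp
  · simp

lemma fangge_eq_pure (array : List (List Int)) :
    fangge array = pure0 array (array.length : Int) := by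
  have hn : (0:Int) ≤ (array.length : Int) := Int.natCast_nonneg _
  have hinit : InvA array (array.length : Int)
      (List.replicate (array.length * 2 + 2)
        (List.replicate (array.length + 1) (List.replicate (array.length + 1) (0 : Int))))
      2 1 1 := by
    refine ⟨⟨by simp; omega, ?_⟩, ?_⟩
    · intro L hL
      rw [List.eq_of_mem_replicate hL]
      refine ⟨by simp, ?_⟩
      intro R hR
      rw [List.eq_of_mem_replicate hR]
      simp
    · intro k p q hk hp hq
      rw [get3_replicate _ _ _ k p q hk hp hq]
      by_cases hL : lexLt k p q 2 1 1
      · rw [if_pos hL]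
        exact (G_zero array (array.length : Int) k p q
          (by unfold lexLt at hL; omega)).symm
      · rw [if_neg hL]
  unfold pure0
  show (List.foldl (stepA0 array (array.length : Int))
      ((0 : Int), List.replicate (array.length * 2 + 2)
        (List.replicate (array.length + 1) (List.replicate (array.length + 1) (0 : Int))))
      (PySem.List.pyRange 2 ((array.length : Int) * 2 + 2) 1)).1 = _
  have hb : ((array.length : Int) * 2 + 2) = (2 * (array.length : Int) + 2) := by ring
  rw [hb]
  exact loopA0_spec array (array.length : Int) hn (2 * array.length) 2
    (by push_cast; omega) (by omega) 0 _ hinit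

-- ===== VERDICT (by name: the statement is the Claim_ definition above) =====
theorem fangge_spec : Claim_equal_fangge := by
  intro array _ _
  unfold Spec_fangge
  rw [fangge_eq_pure, fangge_alt_eq_pure]
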